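-- pv_equiv track=rewrite | github.com/Aditya-gam/LeetCode-DSA-Journey | solutions/Medium/Keys_and_Rooms_0841.py | canVisitAllRoomsBFS
-- ===== SOURCE A (Python) =====
-- from collections import deque
--
-- def canVisitAllRoomsBFS(rooms):
--     """
--     :type rooms: List[List[int]]
--     :rtype: bool
--     """
--     visited = set()
--     queue = deque([0])  # Start from room 0
--     visited.add(0)
--
--     while queue:
--         room = queue.popleft()
--         for key in rooms[room]:
--             if key not in visited:
--                 visited.add(key)
--                 queue.append(key)
--
--     return len(visited) == len(rooms)
-- ===== SOURCE B (Python) =====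
-- def canVisitAllRoomsBFS(rooms):
--     """
--     :type rooms: List[List[int]]
--     :rtype: bool
--     """
--     visited = {0}
--     frontier = {0}
--     while frontier:
--         frontier = {key for room in frontier for key in rooms[room]} - visited
--         visited |= frontier
--     return len(visited) == len(rooms)
-- ===== Notes on version B (the rewrite author's own statement) =====
-- stated objective: alternative
-- what changed: Replaces the per-node FIFO-queue BFS with a level-synchronous frontier iteration: each round builds the whole next frontier as a set comprehension over the current frontier minus visited and unions it in, so no queue and no per-key membership branch exist.
-- outside the precondition, e.g. on canVisitAllRoomsBFS([]): A raises IndexError, B raises IndexError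
import Mathlib
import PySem

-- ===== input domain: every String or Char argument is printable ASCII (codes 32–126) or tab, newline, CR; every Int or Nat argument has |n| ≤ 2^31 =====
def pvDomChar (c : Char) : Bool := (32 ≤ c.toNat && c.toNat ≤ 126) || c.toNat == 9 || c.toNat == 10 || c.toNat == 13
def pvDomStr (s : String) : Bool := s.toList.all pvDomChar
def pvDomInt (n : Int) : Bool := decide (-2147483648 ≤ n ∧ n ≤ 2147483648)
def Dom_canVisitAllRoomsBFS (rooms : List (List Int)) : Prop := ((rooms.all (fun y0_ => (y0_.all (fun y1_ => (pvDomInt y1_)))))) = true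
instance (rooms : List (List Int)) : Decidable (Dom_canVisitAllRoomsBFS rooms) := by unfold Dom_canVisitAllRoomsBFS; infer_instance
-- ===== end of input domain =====

-- B replaces A's per-node FIFO-queue BFS by a level-synchronous frontier iteration
-- (next frontier = set comprehension over the current frontier minus visited, unioned in);
-- same final len(visited) == len(rooms) test.

-- ===== PORT A =====

-- rooms[room] with Python index semantics (negative index counts from the end); the
-- `.getD []` arm is only reached where the Python raises IndexError, which Pre_ excludes.
def pvKeys (rooms : List (List Int)) (room : Int) : List Int :=
  (PySem.List.pyGet? rooms room).getD []

-- the `while queue:` loop; fuel counts popleft operations, 1 + total number of keys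
-- is an upper bound (each append adds a fresh element of the key multiset to visited).
def bfsLoop (rooms : List (List Int)) : Nat → List Int → PySem.Set Int → PySem.Set Int
  | 0, _, visited => visited
  | _ + 1, [], visited => visited
  | fuel + 1, room :: rest, visited =>
    let st := (pvKeys rooms room).foldl
      (fun (st : PySem.Set Int × List Int) key =>
        if key ∈ st.1 then st else (PySem.Set.add st.1 key, st.2 ++ [key]))
      (visited, rest)
    bfsLoop rooms fuel st.2 st.1

def canVisitAllRoomsBFS (rooms : List (List Int)) : Bool :=
  let visited := bfsLoop rooms (1 + rooms.flatten.length) [0] (PySem.Set.add PySem.Set.empty 0)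
  visited.length == rooms.length

-- ===== PORT B =====

-- the `while frontier:` loop; one step = one whole level: frontier is replaced by the
-- set comprehension {key for room in frontier for key in rooms[room]} minus visited,
-- then unioned into visited.  Fuel counts levels; every level but the last adds at
-- least one room to visited, so 2 + total number of keys is an upper bound.
def lvlLoop (rooms : List (List Int)) : Nat → PySem.Set Int → PySem.Set Int → PySem.Set Int
  | 0, visited, _ => visited
  | _ + 1, visited, [] => visited
  | fuel + 1, visited, frontier =>
    let next := PySem.Set.diff
      (PySem.Set.ofList (frontier.flatMap (fun room => (PySem.List.pyGet? rooms room).getD [])))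
      visited
    lvlLoop rooms fuel (PySem.Set.union visited next) next

def canVisitAllRoomsBFS_alt (rooms : List (List Int)) : Bool :=
  let visited := lvlLoop rooms (2 + rooms.flatten.length)
    (PySem.Set.add PySem.Set.empty 0) (PySem.Set.add PySem.Set.empty 0)
  visited.length == rooms.length

-- ===== PRECONDITION & SPEC =====

-- one expansion step of the key graph from the current set S, stepping only out of rooms
-- whose index is valid for `rooms` (pyGet? is none, hence contributes [], exactly there)
def pvExpand (rooms : List (List Int)) (S : List Int) : List Int :=
  PySem.Set.update S (S.flatMap (fun r => (PySem.List.pyGet? rooms r).getD []))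

def pvClosure (rooms : List (List Int)) : Nat → List Int → List Int
  | 0, S => S
  | n + 1, S => pvClosure rooms n (pvExpand rooms S)

-- Pre_ holds EXACTLY on the inputs where the Python A returns: A raises IndexError
-- precisely when the traversal reaches a room index outside [-len(rooms), len(rooms)),
-- i.e. when the key-closure of {0} (expanded through in-range rooms only; 1 + total
-- number of keys expansion rounds reach the fixpoint) contains an out-of-range index —
-- in particular rooms = [] is excluded, since room 0 itself is then out of range.
-- Out-of-range keys that the traversal never reaches are NOT excluded.
def Pre_canVisitAllRoomsBFS (rooms : List (List Int)) : Prop :=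
  ∀ x ∈ pvClosure rooms (1 + rooms.flatten.length) [0],
    -(rooms.length : Int) ≤ x ∧ x < (rooms.length : Int)

instance (rooms : List (List Int)) : Decidable (Pre_canVisitAllRoomsBFS rooms) := by
  unfold Pre_canVisitAllRoomsBFS; infer_instance

def pvWitness_canVisitAllRoomsBFS : List (List Int) := [[1], [0]]

def Spec_canVisitAllRoomsBFS (rooms : List (List Int)) (out : Bool) : Prop :=
  out = canVisitAllRoomsBFS_alt rooms

instance (rooms : List (List Int)) (out : Bool) : Decidable (Spec_canVisitAllRoomsBFS rooms out) := by
  unfold Spec_canVisitAllRoomsBFS; infer_instance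

-- ===== CLAIM (what is proved, stated in full; the proofs are below) =====
def Claim_equal_canVisitAllRoomsBFS : Prop := ∀ (rooms : List (List Int)), Dom_canVisitAllRoomsBFS rooms → Pre_canVisitAllRoomsBFS rooms → Spec_canVisitAllRoomsBFS rooms (canVisitAllRoomsBFS rooms)

-- ===== LEMMAS AND PROOFS =====

-- one key step of the room graph: b is a key found in room a
def pvStep (rooms : List (List Int)) (a b : Int) : Prop := b ∈ pvKeys rooms a

lemma pvKeys_subset_flatten (rooms : List (List Int)) (r k : Int)
    (h : k ∈ pvKeys rooms r) : k ∈ rooms.flatten := by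
  unfold pvKeys at h
  cases hg : PySem.List.pyGet? rooms r with
  | none => rw [hg] at h; simp at h
  | some l =>
    rw [hg] at h
    exact List.mem_flatten.2 ⟨l, PySem.List.mem_of_pyGet?_eq_some rooms hg, h⟩

lemma pvNodupLen {vis : List Int} (rooms : List (List Int))
    (hnd : vis.Nodup) (hsub : ∀ x ∈ vis, x ∈ (0 : Int) :: rooms.flatten) :
    vis.length ≤ 1 + rooms.flatten.length := by
  have h2 := (hnd.subperm hsub).length_le
  simp only [List.length_cons] at h2
  omega

lemma pvNodupAppend {vis : List Int} {k : Int}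
    (hnd : vis.Nodup) (hk : k ∉ vis) : (vis ++ [k]).Nodup := by
  rw [List.nodup_append]
  exact ⟨hnd, List.nodup_singleton _, fun a ha b hb => by
    simp at hb; subst hb; exact fun h => hk (h ▸ ha)⟩

-- inner fold of A's while-body: drains rooms[room], appending fresh keys to both
-- visited and the queue; the two grow by the same list `new`.
lemma bfs_fold (ks : List Int) : ∀ (vis q : List Int), vis.Nodup →
    ∃ new : List Int,
      ks.foldl (fun (st : PySem.Set Int × List Int) key =>
          if key ∈ st.1 then st else (PySem.Set.add st.1 key, st.2 ++ [key])) (vis, q)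
        = (vis ++ new, q ++ new)
      ∧ (vis ++ new).Nodup
      ∧ (∀ x ∈ new, x ∈ ks)
      ∧ (∀ x ∈ ks, x ∈ vis ++ new) := by
  induction ks with
  | nil => intro vis q hnd; exact ⟨[], by simp, by simpa using hnd, by simp, by simp⟩
  | cons k ks ih =>
    intro vis q hnd
    by_cases hk : k ∈ vis
    · obtain ⟨new, h1, h2, h3, h4⟩ := ih vis q hnd
      refine ⟨new, ?_, h2, fun x hx => List.mem_cons_of_mem _ (h3 x hx), ?_⟩
      · simpa [hk] using h1
      · intro x hx
        rcases List.mem_cons.1 hx with rfl | hx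
        · exact List.mem_append.2 (Or.inl hk)
        · exact h4 x hx
    · have hnd' : (vis ++ [k]).Nodup := pvNodupAppend hnd hk
      obtain ⟨new, h1, h2, h3, h4⟩ := ih (vis ++ [k]) (q ++ [k]) hnd'
      refine ⟨k :: new, ?_, ?_, ?_, ?_⟩
      · have heq : ((k :: ks).foldl (fun (st : PySem.Set Int × List Int) key =>
            if key ∈ st.1 then st else (PySem.Set.add st.1 key, st.2 ++ [key])) (vis, q))
            = ks.foldl (fun (st : PySem.Set Int × List Int) key =>
            if key ∈ st.1 then st else (PySem.Set.add st.1 key, st.2 ++ [key])) (vis ++ [k], q ++ [k]) := by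
          simp only [List.foldl_cons, if_neg hk, PySem.Set.add_of_not_mem hk]
        rw [heq, h1]; simp
      · simpa using h2
      · intro x hx
        rcases List.mem_cons.1 hx with rfl | hx
        · exact List.mem_cons_self
        · exact List.mem_cons_of_mem _ (h3 x hx)
      · intro x hx
        rcases List.mem_cons.1 hx with rfl | hx
        · simp
        · have := h4 x hx; simpa [List.mem_append, List.mem_cons, or_assoc] using this

-- main invariant of A's loop: the result contains visited, is closed under keys,
-- and only holds elements reachable from visited ∪ queue.
lemma bfsLoop_spec (rooms : List (List Int)) : ∀ (fuel : Nat) (queue visited : List Int),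
    visited.Nodup →
    (∀ x ∈ queue, x ∈ visited) →
    (∀ r ∈ visited, r ∉ queue → ∀ k ∈ pvKeys rooms r, k ∈ visited) →
    (∀ x ∈ visited, x ∈ (0 : Int) :: rooms.flatten) →
    (queue.length + (1 + rooms.flatten.length) ≤ fuel + visited.length) →
    (bfsLoop rooms fuel queue visited).Nodup
    ∧ (∀ x ∈ visited, x ∈ bfsLoop rooms fuel queue visited)
    ∧ (∀ r ∈ bfsLoop rooms fuel queue visited, ∀ k ∈ pvKeys rooms r, k ∈ bfsLoop rooms fuel queue visited)
    ∧ (∀ x ∈ bfsLoop rooms fuel queue visited,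
        x ∈ visited ∨ ∃ r ∈ queue, Relation.ReflTransGen (pvStep rooms) r x) := by
  intro fuel
  induction fuel with
  | zero =>
    intro queue visited hnd hq hcl hsub hfuel
    have hlen := pvNodupLen rooms hnd hsub
    have hqe : queue = [] := by
      cases queue with
      | nil => rfl
      | cons a l => simp only [List.length_cons] at hfuel; omega
    subst hqe
    refine ⟨hnd, fun x hx => hx, ?_, fun x hx => Or.inl hx⟩
    intro r hr k hk
    exact hcl r hr (by simp) k hk
  | succ fuel ih =>
    intro queue visited hnd hq hcl hsub hfuel
    cases queue with
    | nil =>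
      refine ⟨hnd, fun x hx => hx, ?_, fun x hx => Or.inl hx⟩
      intro r hr k hk
      exact hcl r hr (by simp) k hk
    | cons room rest =>
      obtain ⟨new, h1, h2, h3, h4⟩ := bfs_fold (pvKeys rooms room) visited rest hnd
      have hstep : bfsLoop rooms (fuel + 1) (room :: rest) visited
          = bfsLoop rooms fuel (rest ++ new) (visited ++ new) := by
        simp only [bfsLoop, h1]
      have hnew_flat : ∀ x ∈ new, x ∈ (0 : Int) :: rooms.flatten := by
        intro x hx
        exact List.mem_cons_of_mem _ (pvKeys_subset_flatten rooms room x (h3 x hx))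
      have hsub' : ∀ x ∈ visited ++ new, x ∈ (0 : Int) :: rooms.flatten := by
        intro x hx
        rcases List.mem_append.1 hx with hx | hx
        · exact hsub x hx
        · exact hnew_flat x hx
      have hq' : ∀ x ∈ rest ++ new, x ∈ visited ++ new := by
        intro x hx
        rcases List.mem_append.1 hx with hx | hx
        · exact List.mem_append.2 (Or.inl (hq x (List.mem_cons_of_mem _ hx)))
        · exact List.mem_append.2 (Or.inr hx)
      have hcl' : ∀ r ∈ visited ++ new, r ∉ rest ++ new → ∀ k ∈ pvKeys rooms r, k ∈ visited ++ new := by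
        intro r hr hnr k hk
        rcases List.mem_append.1 hr with hr | hr
        · by_cases hrr : r = room
          · subst hrr; exact h4 k hk
          · have : r ∉ room :: rest := by
              intro hmem
              rcases List.mem_cons.1 hmem with h | h
              · exact hrr h
              · exact hnr (List.mem_append.2 (Or.inl h))
            exact List.mem_append.2 (Or.inl (hcl r hr this k hk))
        · exact absurd (List.mem_append.2 (Or.inr hr)) hnr
      have hfuel' : (rest ++ new).length + (1 + rooms.flatten.length)
          ≤ fuel + (visited ++ new).length := by
        have e1 : (rest ++ new).length = rest.length + new.length := List.length_append
        have e2 : (visited ++ new).length = visited.length + new.length := List.length_append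
        have e3 : (room :: rest).length = rest.length + 1 := List.length_cons
        omega
      obtain ⟨c1, c2, c3, c4⟩ := ih (rest ++ new) (visited ++ new) h2 hq' hcl' hsub' hfuel'
      rw [hstep]
      refine ⟨c1, ?_, c3, ?_⟩
      · intro x hx
        exact c2 x (List.mem_append.2 (Or.inl hx))
      · intro x hx
        rcases c4 x hx with hv | ⟨r, hr, hreach⟩
        · rcases List.mem_append.1 hv with hv | hv
          · exact Or.inl hv
          · exact Or.inr ⟨room, List.mem_cons_self,
              Relation.ReflTransGen.single (h3 x hv)⟩
        · rcases List.mem_append.1 hr with hr | hr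
          · exact Or.inr ⟨r, List.mem_cons_of_mem _ hr, hreach⟩
          · exact Or.inr ⟨room, List.mem_cons_self,
              (Relation.ReflTransGen.single (h3 r hr)).trans hreach⟩

-- main invariant of B's loop: the result contains visited, is closed under keys,
-- and only holds elements reachable from visited ∪ frontier.
lemma lvlLoop_spec (rooms : List (List Int)) : ∀ (fuel : Nat) (visited frontier : List Int),
    visited.Nodup →
    (∀ x ∈ frontier, x ∈ visited) →
    (∀ r ∈ visited, r ∉ frontier → ∀ k ∈ pvKeys rooms r, k ∈ visited) →
    (∀ x ∈ visited, x ∈ (0 : Int) :: rooms.flatten) →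
    (frontier ≠ [] → 2 + rooms.flatten.length ≤ fuel + visited.length) →
    (lvlLoop rooms fuel visited frontier).Nodup
    ∧ (∀ x ∈ visited, x ∈ lvlLoop rooms fuel visited frontier)
    ∧ (∀ r ∈ lvlLoop rooms fuel visited frontier, ∀ k ∈ pvKeys rooms r,
        k ∈ lvlLoop rooms fuel visited frontier)
    ∧ (∀ x ∈ lvlLoop rooms fuel visited frontier,
        x ∈ visited ∨ ∃ r ∈ frontier, Relation.ReflTransGen (pvStep rooms) r x) := by
  intro fuel
  induction fuel with
  | zero =>
    intro visited frontier hnd hf hcl hsub hfuel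
    have hlen := pvNodupLen rooms hnd hsub
    have hfe : frontier = [] := by
      by_contra h
      have := hfuel h
      omega
    subst hfe
    refine ⟨hnd, fun x hx => hx, ?_, fun x hx => Or.inl hx⟩
    intro r hr k hk
    exact hcl r hr (by simp) k hk
  | succ fuel ih =>
    intro visited frontier hnd hf hcl hsub hfuel
    cases frontier with
    | nil =>
      refine ⟨hnd, fun x hx => hx, ?_, fun x hx => Or.inl hx⟩
      intro r hr k hk
      exact hcl r hr (by simp) k hk
    | cons a t =>
      -- the whole next level, as a set, minus visited
      set F := a :: t with hF
      set next := PySem.Set.diff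
        (PySem.Set.ofList (F.flatMap (fun room => (PySem.List.pyGet? rooms room).getD [])))
        visited with hnext
      have hstep : lvlLoop rooms (fuel + 1) visited F
          = lvlLoop rooms fuel (PySem.Set.union visited next) next := rfl
      have hmem_next : ∀ x, x ∈ next ↔ (∃ r ∈ F, x ∈ pvKeys rooms r) ∧ x ∉ visited := by
        intro x
        rw [hnext, PySem.Set.mem_diff, PySem.Set.mem_ofList, List.mem_flatMap]
        exact Iff.rfl
      have hnd_next : next.Nodup := PySem.Set.nodup_diff _ _ (PySem.Set.nodup_ofList _)
      have hdisj : ∀ x ∈ next, x ∉ visited := fun x hx => ((hmem_next x).1 hx).2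
      have hunion : PySem.Set.union visited next = visited ++ next :=
        PySem.Set.update_eq_append_of_disjoint visited next hnd_next hdisj
      have hnd' : (visited ++ next).Nodup := by
        rw [List.nodup_append]
        exact ⟨hnd, hnd_next, fun x hx y hy hxy => hdisj y hy (hxy ▸ hx)⟩
      have hf' : ∀ x ∈ next, x ∈ visited ++ next := fun x hx => List.mem_append.2 (Or.inr hx)
      have hsub' : ∀ x ∈ visited ++ next, x ∈ (0 : Int) :: rooms.flatten := by
        intro x hx
        rcases List.mem_append.1 hx with hx | hx
        · exact hsub x hx
        · obtain ⟨⟨r, _, hk⟩, _⟩ := (hmem_next x).1 hx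
          exact List.mem_cons_of_mem _ (pvKeys_subset_flatten rooms r x hk)
      -- every room of the old frontier has just been fully expanded
      have hexp : ∀ r ∈ F, ∀ k ∈ pvKeys rooms r, k ∈ visited ++ next := by
        intro r hr k hk
        by_cases hkv : k ∈ visited
        · exact List.mem_append.2 (Or.inl hkv)
        · exact List.mem_append.2 (Or.inr ((hmem_next k).2 ⟨⟨r, hr, hk⟩, hkv⟩))
      have hcl' : ∀ r ∈ visited ++ next, r ∉ next → ∀ k ∈ pvKeys rooms r, k ∈ visited ++ next := by
        intro r hr hnr k hk
        rcases List.mem_append.1 hr with hr | hr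
        · by_cases hrf : r ∈ F
          · exact hexp r hrf k hk
          · exact List.mem_append.2 (Or.inl (hcl r hr hrf k hk))
        · exact absurd hr hnr
      have hfuel' : next ≠ [] → 2 + rooms.flatten.length ≤ fuel + (visited ++ next).length := by
        intro hne
        have h1 := hfuel (by simp [hF])
        have h2 : 0 < next.length := List.length_pos_of_ne_nil hne
        have e : (visited ++ next).length = visited.length + next.length := List.length_append
        omega
      obtain ⟨c1, c2, c3, c4⟩ := ih (visited ++ next) next hnd' hf' hcl' hsub' hfuel'
      rw [hstep, hunion]
      refine ⟨c1, ?_, c3, ?_⟩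
      · intro x hx
        exact c2 x (List.mem_append.2 (Or.inl hx))
      · intro x hx
        rcases c4 x hx with hv | ⟨r, hr, hreach⟩
        · rcases List.mem_append.1 hv with hv | hv
          · exact Or.inl hv
          · obtain ⟨⟨r, hrF, hk⟩, _⟩ := (hmem_next x).1 hv
            exact Or.inr ⟨r, hrF, Relation.ReflTransGen.single hk⟩
        · obtain ⟨⟨r', hr'F, hk⟩, _⟩ := (hmem_next r).1 hr
          exact Or.inr ⟨r', hr'F, (Relation.ReflTransGen.single hk).trans hreach⟩

-- a key-closed set containing 0 contains every reachable room
lemma closed_complete (rooms : List (List Int)) (T : List Int)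
    (h0 : (0 : Int) ∈ T)
    (hcl : ∀ r ∈ T, ∀ k ∈ pvKeys rooms r, k ∈ T) :
    ∀ x, Relation.ReflTransGen (pvStep rooms) 0 x → x ∈ T := by
  intro x hx
  induction hx with
  | refl => exact h0
  | tail _ hstep ih => exact hcl _ ih _ hstep

-- ===== VERDICT (by name: the statement is the Claim_ definition above) =====
theorem canVisitAllRoomsBFS_spec : Claim_equal_canVisitAllRoomsBFS := by
  intro rooms _ _
  unfold Spec_canVisitAllRoomsBFS canVisitAllRoomsBFS canVisitAllRoomsBFS_alt
  have hinit : PySem.Set.add (PySem.Set.empty (α := Int)) 0 = [0] := rfl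
  rw [hinit]
  obtain ⟨a1, a2, a3, a4⟩ := bfsLoop_spec rooms (1 + rooms.flatten.length) [0] [0]
    (by simp) (by simp) (by intro r hr hnr; simp at hr hnr; simp [hr] at hnr)
    (by intro x hx; simp at hx; simp [hx])
    (by simp only [List.length_cons, List.length_nil]; omega)
  obtain ⟨b1, b2, b3, b4⟩ := lvlLoop_spec rooms (2 + rooms.flatten.length) [0] [0]
    (by simp) (by simp) (by intro r hr hnr; simp at hr hnr; simp [hr] at hnr)
    (by intro x hx; simp at hx; simp [hx])
    (by intro _; simp only [List.length_cons, List.length_nil]; omega)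
  set SA := bfsLoop rooms (1 + rooms.flatten.length) [0] [0] with hSA
  set SB := lvlLoop rooms (2 + rooms.flatten.length) [0] [0] with hSB
  have h0A : (0 : Int) ∈ SA := a2 0 (by simp)
  have h0B : (0 : Int) ∈ SB := b2 0 (by simp)
  have hmem : ∀ x : Int, x ∈ SA ↔ x ∈ SB := by
    intro x
    constructor
    · intro hx
      rcases a4 x hx with h | ⟨r, hr, hreach⟩
      · simp at h; subst h; exact h0B
      · simp at hr; subst hr
        exact closed_complete rooms SB h0B b3 x hreach
    · intro hx
      rcases b4 x hx with h | ⟨r, hr, hreach⟩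
      · simp at h; subst h; exact h0A
      · simp at hr; subst hr
        exact closed_complete rooms SA h0A a3 x hreach
  have hperm : SA.Perm SB := (List.perm_ext_iff_of_nodup a1 b1).2 hmem
  show (SA.length == rooms.length) = (SB.length == rooms.length)
  rw [hperm.length_eq]
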